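-- pv_equiv track=rewrite | github.com/ChangYujieCN/Leetcode | 0001-0099/0010. Regular Expression Matching/0010. Regular Expression Matching.py | isMatch3
-- ===== SOURCE A (Python) =====
-- def isMatch3(s: str, p: str) -> bool:
--     m, n = len(s), len(p)
--     dp = [[False] * (n + 1) for _ in range(m + 1)]
--
--     for i in range(m, -1, -1):
--         for j in range(n, -1, -1):
--             if i == m and j == n:
--                 dp[i][j] = True
--             else:
--                 first_match = i < m and j < n and p[j] in {s[i], '.'}
--                 if j + 1 < n and p[j + 1] == '*':
--                     dp[i][j] = dp[i][j + 2] or first_match and dp[i + 1][j]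
--                 else:
--                     dp[i][j] = first_match and dp[i + 1][j + 1]
--
--     return dp[0][0]
-- ===== SOURCE B (Python) =====
-- def _tokens(p):
--     tokens = []
--     j = 0
--     while j < len(p):
--         if j + 1 < len(p) and p[j + 1] == '*':
--             tokens.append((p[j], True))
--             j += 2
--         else:
--             tokens.append((p[j], False))
--             j += 1
--     return tokens
--
--
-- def _closure(tokens, act):
--     # epsilon-closure: a starred unit may be skipped, so state j -> state j+1
--     out = list(act)
--     for j, (c, star) in enumerate(tokens):
--         if star and out[j]:
--             out[j + 1] = True
--     return out
--
--
-- def _step(x, tokens, act):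
--     # consume one character x from every active state
--     new = []
--     inc = False  # activation arriving from the previous (non-starred) unit
--     for (c, star), a in zip(tokens, act):
--         fm = a and (c == x or c == '.')
--         if star:
--             new.append(inc or fm)  # a starred unit loops on itself
--             inc = False
--         else:
--             new.append(inc)
--             inc = fm               # a plain unit advances to the next state
--     new.append(inc)
--     return new
--
--
-- def isMatch3(s: str, p: str) -> bool:
--     # Thompson-style NFA simulation: tokenize the pattern into (char, starred)
--     # units = NFA states, then scan s once keeping the set of active states.
--     tokens = _tokens(p)
--     act = _closure(tokens, [True] + [False] * len(tokens))
--     for x in s: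
--         act = _closure(tokens, _step(x, tokens, act))
--     return act[len(tokens)]
-- ===== Notes on version B (the rewrite author's own statement) =====
-- stated objective: alternative
-- what changed: B replaces A's backward-filled (m+1)x(n+1) DP table with a Thompson-style NFA simulation: the pattern is compiled once into (char, starred) units treated as NFA states and s is scanned forward a single time maintaining the boolean vector of active states with an epsilon-closure over starred units.
import Mathlib
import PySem

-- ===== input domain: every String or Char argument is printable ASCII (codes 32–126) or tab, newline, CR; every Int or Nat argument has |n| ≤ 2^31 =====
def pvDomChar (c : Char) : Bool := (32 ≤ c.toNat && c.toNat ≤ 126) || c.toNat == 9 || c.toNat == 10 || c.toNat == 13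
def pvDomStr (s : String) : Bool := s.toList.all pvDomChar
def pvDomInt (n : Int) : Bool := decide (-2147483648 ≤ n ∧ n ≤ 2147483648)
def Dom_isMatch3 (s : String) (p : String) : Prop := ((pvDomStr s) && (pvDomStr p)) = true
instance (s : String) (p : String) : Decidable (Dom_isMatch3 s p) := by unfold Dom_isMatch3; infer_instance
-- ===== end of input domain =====

-- B replaces A's backward (m+1)×(n+1) DP table by a Thompson-style NFA simulation:
-- the pattern is tokenized into (char, starred) units = NFA states and s is scanned
-- forward once keeping the set of active states (alternative algorithm, O(m) space).

-- ===== PORT A =====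
-- the body of A's inner loop: computes dp[i][j] from already-written cells and stores it
def pvRowStep (sl pl : List Char) (i : Int) (dp : PySem.Dict (Int × Int) Bool) (j : Int) :
    PySem.Dict (Int × Int) Bool :=
  let m : Int := sl.length
  let n : Int := pl.length
  if i == m && j == n then
    dp.insert (i, j) true
  else
    let first_match := decide (i < m) && decide (j < n) &&
      (PySem.List.pyGetD pl j ' ' == PySem.List.pyGetD sl i ' ' ||
       PySem.List.pyGetD pl j ' ' == '.')
    if decide (j + 1 < n) && (PySem.List.pyGetD pl (j + 1) ' ' == '*') then
      dp.insert (i, j) (dp.getD (i, j + 2) false || (first_match && dp.getD (i + 1, j) false))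
    else
      dp.insert (i, j) (first_match && dp.getD (i + 1, j + 1) false)

def isMatch3 (s : String) (p : String) : Bool :=
  let sl := s.toList
  let pl := p.toList
  let dp :=
    (PySem.List.pyRange (sl.length : Int) (-1) (-1)).foldl
      (fun dp i => (PySem.List.pyRange (pl.length : Int) (-1) (-1)).foldl (pvRowStep sl pl i) dp)
      PySem.Dict.empty
  dp.getD (0, 0) false

-- ===== PORT B =====
-- _tokens: one pass over the pattern; each unit is a char with a 'starred' flag
def pvTokens : List Char → List (Char × Bool)
  | [] => []
  | c :: rest =>
    if rest.head? = some '*' then (c, true) :: pvTokens rest.tail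
    else (c, false) :: pvTokens rest
termination_by l => l.length
decreasing_by all_goals simp

-- _closure: forward pass 'if star and out[j]: out[j+1] = True'
def pvClosure : List (Char × Bool) → List Bool → List Bool
  | [], act => act
  | _ :: _, [] => []
  | (_, st) :: ts, a :: rest =>
    a :: pvClosure ts ((rest.headD false || (st && a)) :: rest.tail)

-- _step: zip over (tokens, act) with the carry 'inc' arriving from the previous plain unit
def pvStep (x : Char) : List (Char × Bool) → Bool → List Bool → List Bool
  | [], inc, _ => [inc]
  | _ :: _, inc, [] => [inc]
  | (c, st) :: ts, inc, a :: rest =>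
    let fm := a && (c == x || c == '.')
    if st then (inc || fm) :: pvStep x ts false rest
    else inc :: pvStep x ts fm rest

def isMatch3_alt (s : String) (p : String) : Bool :=
  let tokens := pvTokens p.toList
  let act0 := pvClosure tokens (true :: List.replicate tokens.length false)
  let act := s.toList.foldl (fun act x => pvClosure tokens (pvStep x tokens false act)) act0
  act.getD tokens.length false

-- ===== PRECONDITION & SPEC =====
def Spec_isMatch3 (s : String) (p : String) (out : Bool) : Prop := out = isMatch3_alt s p
instance (s : String) (p : String) (out : Bool) : Decidable (Spec_isMatch3 s p out) := by
  unfold Spec_isMatch3; infer_instance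

-- ===== CLAIM (what is proved, stated in full; the proofs are below) =====
def Claim_equal_isMatch3 : Prop := ∀ (s : String) (p : String), Dom_isMatch3 s p → Spec_isMatch3 s p (isMatch3 s p)

-- ===== LEMMAS AND PROOFS =====

-- the common specification: suffix recursion for regex matching with '.' and '*'
def pvMrec : List Char → List Char → Bool
  | s, [] => s.isEmpty
  | s, c :: rest =>
    if rest.head? = some '*' then
      pvMrec s rest.tail ||
        (match s with
         | [] => false
         | x :: s' => (c == x || c == '.') && pvMrec s' (c :: rest))
    else
      match s with
      | [] => false
      | x :: s' => (c == x || c == '.') && pvMrec s' rest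
termination_by s pat => s.length + pat.length
decreasing_by all_goals first
  | (simp; omega)
  | simp

-- A-side: the intended content of cell (i, j) of the table
def pvCell (sl pl : List Char) (i j : Int) : Bool :=
  if 0 ≤ i ∧ i ≤ (sl.length : Int) ∧ 0 ≤ j ∧ j ≤ (pl.length : Int) then
    pvMrec (sl.drop i.toNat) (pl.drop j.toNat)
  else false

theorem pvCell_natCast (sl pl : List Char) (a b : Nat) (ha : a ≤ sl.length) (hb : b ≤ pl.length) :
    pvCell sl pl (a : Int) (b : Int) = pvMrec (sl.drop a) (pl.drop b) := by
  rw [pvCell, if_pos]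
  · simp
  · refine ⟨by exact_mod_cast Nat.zero_le a, by exact_mod_cast ha,
      by exact_mod_cast Nat.zero_le b, by exact_mod_cast hb⟩

theorem pvMrec_nil (s : List Char) : pvMrec s [] = s.isEmpty := by
  rw [pvMrec.eq_def]

theorem pvMrec_cons (s : List Char) (c : Char) (rest : List Char) :
    pvMrec s (c :: rest) =
      if rest.head? = some '*' then
        pvMrec s rest.tail ||
          (match s with
           | [] => false
           | x :: s' => (c == x || c == '.') && pvMrec s' (c :: rest))
      else
        match s with
        | [] => false
        | x :: s' => (c == x || c == '.') && pvMrec s' rest := by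
  rw [pvMrec.eq_def]

theorem pvRowStep_eq (sl pl : List Char) (a b : Nat) (dp : PySem.Dict (Int × Int) Bool)
    (ha : a ≤ sl.length) (hb : b ≤ pl.length)
    (H2 : b + 2 ≤ pl.length →
      dp.getD ((a : Int), (b : Int) + 2) false = pvCell sl pl (a : Int) ((b : Int) + 2))
    (Hb : dp.getD ((a : Int) + 1, (b : Int)) false = pvCell sl pl ((a : Int) + 1) (b : Int))
    (Hd : b + 1 ≤ pl.length →
      dp.getD ((a : Int) + 1, (b : Int) + 1) false = pvCell sl pl ((a : Int) + 1) ((b : Int) + 1)) :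
    pvRowStep sl pl (a : Int) dp (b : Int) =
      dp.insert ((a : Int), (b : Int)) (pvCell sl pl (a : Int) (b : Int)) := by
  simp only [pvRowStep]
  have hpy_b : PySem.List.pyGetD pl ((b : Int)) ' ' = pl.getD b ' ' :=
    PySem.List.pyGetD_natCast pl b ' '
  have hpy_b1 : PySem.List.pyGetD pl ((b : Int) + 1) ' ' = pl.getD (b + 1) ' ' := by
    rw [show ((b : Int) + 1) = ((b + 1 : Nat) : Int) from by push_cast; ring]
    exact PySem.List.pyGetD_natCast pl (b + 1) ' '
  have hpy_a : PySem.List.pyGetD sl ((a : Int)) ' ' = sl.getD a ' ' :=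
    PySem.List.pyGetD_natCast sl a ' '
  have hb2 : ((b : Int) + 2) = ((b + 2 : Nat) : Int) := by push_cast; ring
  have hb1 : ((b : Int) + 1) = ((b + 1 : Nat) : Int) := by push_cast; ring
  have ha1 : ((a : Int) + 1) = ((a + 1 : Nat) : Int) := by push_cast; ring
  by_cases hbn : b = pl.length
  · by_cases ham : a = sl.length
    · subst ham; subst hbn
      rw [if_pos (by simp)]
      congr 1
      rw [pvCell_natCast sl pl _ _ le_rfl le_rfl, List.drop_length, List.drop_length, pvMrec_nil]
      rfl
    · rw [if_neg (by simp; intro h; exact absurd (by exact_mod_cast h) ham)]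
      subst hbn
      rw [if_neg (by simp)]
      congr 1
      rw [pvCell_natCast sl pl a pl.length ha le_rfl, List.drop_length, pvMrec_nil]
      have hal : a < sl.length := lt_of_le_of_ne ha ham
      rw [Bool.eq_iff_iff]
      simp [List.isEmpty_iff, List.drop_eq_nil_iff]
      omega
  · have hblt : b < pl.length := lt_of_le_of_ne hb hbn
    rw [if_neg (by simp; intro _ h; exact absurd (by exact_mod_cast h) hbn)]
    have hdropb : pl.drop b = pl[b] :: pl.drop (b + 1) := (List.getElem_cons_drop hblt).symm
    rw [pvCell_natCast sl pl a b ha hb, hdropb, pvMrec_cons, List.head?_drop, List.tail_drop]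
    by_cases hstar : pl[b + 1]? = some '*'
    · have hs1 : b + 1 < pl.length := (List.getElem?_eq_some_iff.mp hstar).1
      rw [if_pos (by
        simp only [hpy_b1, Bool.and_eq_true, decide_eq_true_eq, beq_iff_eq]
        refine ⟨by exact_mod_cast hs1, ?_⟩
        rw [List.getD_eq_getElem?_getD, hstar]
        rfl)]
      rw [if_pos hstar]
      congr 1
      rw [H2 (by omega), Hb, hb2, pvCell_natCast sl pl a (b + 2) ha (by omega)]
      congr 1
      by_cases hal : a < sl.length
      · have hdropa : sl.drop a = sl[a] :: sl.drop (a + 1) := (List.getElem_cons_drop hal).symm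
        rw [ha1, pvCell_natCast sl pl (a + 1) b (by omega) hb, hdropa]
        simp only [hpy_b, hpy_a, List.getD_eq_getElem pl ' ' hblt, List.getD_eq_getElem sl ' ' hal]
        rw [hdropb]
        simp [hal, hblt]
      · have hae : a = sl.length := by omega
        subst hae
        simp [List.drop_length]
    · rw [if_neg (by
        simp only [hpy_b1, Bool.and_eq_true, decide_eq_true_eq, beq_iff_eq, not_and]
        intro h1
        have h1' : b + 1 < pl.length := by exact_mod_cast h1
        rw [List.getD_eq_getElem?_getD]
        intro h2
        apply hstar
        rw [List.getElem?_eq_getElem h1']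
        rw [List.getElem?_eq_getElem h1', Option.getD_some] at h2
        exact congrArg some h2)]
      rw [if_neg hstar]
      congr 1
      rw [Hd (by omega), ha1, hb1]
      by_cases hal : a < sl.length
      · have hdropa : sl.drop a = sl[a] :: sl.drop (a + 1) := (List.getElem_cons_drop hal).symm
        rw [pvCell_natCast sl pl (a + 1) (b + 1) (by omega) (by omega), hdropa]
        simp only [hpy_b, hpy_a, List.getD_eq_getElem pl ' ' hblt, List.getD_eq_getElem sl ' ' hal]
        simp [hal, hblt]
      · have hae : a = sl.length := by omega
        subst hae
        simp [List.drop_length]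

theorem innerFold (sl pl : List Char) (a : Nat) (ha : a ≤ sl.length) :
    ∀ (k : Nat), k ≤ pl.length + 1 → ∀ dp : PySem.Dict (Int × Int) Bool,
    (∀ b : Nat, k ≤ b → b ≤ pl.length →
      dp.getD ((a : Int), (b : Int)) false = pvCell sl pl (a : Int) (b : Int)) →
    (∀ b : Nat, b ≤ pl.length →
      dp.getD ((a : Int) + 1, (b : Int)) false = pvCell sl pl ((a : Int) + 1) (b : Int)) →
    (∀ b : Nat, b ≤ pl.length →
      ((PySem.List.pyRange ((k : Int) - 1) (-1) (-1)).foldl (pvRowStep sl pl (a : Int)) dp).getD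
        ((a : Int), (b : Int)) false = pvCell sl pl (a : Int) (b : Int))
    ∧ (∀ b : Nat, b ≤ pl.length →
      ((PySem.List.pyRange ((k : Int) - 1) (-1) (-1)).foldl (pvRowStep sl pl (a : Int)) dp).getD
        ((a : Int) + 1, (b : Int)) false = pvCell sl pl ((a : Int) + 1) (b : Int)) := by
  intro k
  induction k with
  | zero =>
    intro _ dp Hcur Hprev
    rw [show ((0 : Nat) : Int) - 1 = -1 from by norm_num,
        PySem.List.pyRange_neg_one_eq_nil le_rfl]
    exact ⟨fun b hb => Hcur b (Nat.zero_le b) hb, Hprev⟩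
  | succ k ih =>
    intro hk dp Hcur Hprev
    rw [show ((k + 1 : Nat) : Int) - 1 = (k : Int) from by push_cast; ring,
        PySem.List.pyRange_neg_one_cons (by omega), List.foldl_cons]
    rw [pvRowStep_eq sl pl a k dp ha (by omega)
      (fun h => by
        rw [show ((k : Int) + 2) = ((k + 2 : Nat) : Int) from by push_cast; ring]
        exact Hcur (k + 2) (by omega) (by omega))
      (Hprev k (by omega))
      (fun h => by
        rw [show ((k : Int) + 1) = ((k + 1 : Nat) : Int) from by push_cast; ring]
        exact Hprev (k + 1) (by omega))]
    exact ih (by omega) _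
      (fun b hkb hbn => by
        rw [PySem.Dict.getD_insert]
        by_cases hbk : b = k
        · subst hbk; rw [if_pos rfl]
        · rw [if_neg (by
            intro h
            have := congrArg Prod.snd h
            simp only at this
            exact hbk (by exact_mod_cast this))]
          exact Hcur b (by omega) hbn)
      (fun b hbn => by
        rw [PySem.Dict.getD_insert, if_neg (by
          intro h
          have := congrArg Prod.fst h
          simp only at this
          omega)]
        exact Hprev b hbn)

theorem outerFold (sl pl : List Char) :
    ∀ (k : Nat), k ≤ sl.length + 1 → ∀ dp : PySem.Dict (Int × Int) Bool,
    (∀ b : Nat, b ≤ pl.length →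
      dp.getD ((k : Int), (b : Int)) false = pvCell sl pl (k : Int) (b : Int)) →
    ∀ b : Nat, b ≤ pl.length →
      ((PySem.List.pyRange ((k : Int) - 1) (-1) (-1)).foldl
        (fun dp i => (PySem.List.pyRange ((pl.length : Int)) (-1) (-1)).foldl (pvRowStep sl pl i) dp)
        dp).getD ((0 : Int), (b : Int)) false = pvCell sl pl 0 (b : Int) := by
  intro k
  induction k with
  | zero =>
    intro _ dp Hrow b hb
    rw [show ((0 : Nat) : Int) - 1 = -1 from by norm_num,
        PySem.List.pyRange_neg_one_eq_nil le_rfl]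
    simpa using Hrow b hb
  | succ k ih =>
    intro hk dp Hrow
    rw [show ((k + 1 : Nat) : Int) - 1 = (k : Int) from by push_cast; ring]
    rw [show PySem.List.pyRange ((k : Int)) (-1) (-1) =
          (k : Int) :: PySem.List.pyRange ((k : Int) - 1) (-1) (-1) from
        PySem.List.pyRange_neg_one_cons (by omega), List.foldl_cons]
    have hinner := innerFold sl pl k (by omega) (pl.length + 1) (by omega) dp
      (fun b hkb hbn => by omega)
      (fun b hbn => by
        rw [show ((k : Int) + 1) = ((k + 1 : Nat) : Int) from by push_cast; ring]
        exact Hrow b hbn)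
    rw [show (((pl.length + 1 : Nat) : Int) - 1) = ((pl.length : Int)) from by push_cast; ring] at hinner
    exact ih (by omega) _ hinner.1

theorem a_eq_mrec (s p : String) : isMatch3 s p = pvMrec s.toList p.toList := by
  show ((PySem.List.pyRange ((s.toList.length : Int)) (-1) (-1)).foldl
      (fun dp i =>
        (PySem.List.pyRange ((p.toList.length : Int)) (-1) (-1)).foldl
          (pvRowStep s.toList p.toList i) dp)
      PySem.Dict.empty).getD (0, 0) false = _
  have h := outerFold s.toList p.toList (s.toList.length + 1) (by omega) PySem.Dict.empty
    (fun b hbn => by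
      rw [show ((PySem.Dict.empty : PySem.Dict (Int × Int) Bool).getD
          (((s.toList.length + 1 : Nat) : Int), (b : Int)) false) = false from by
        simp [PySem.Dict.empty, PySem.Dict.getD, PySem.Dict.get?]]
      rw [pvCell, if_neg (by push_cast; omega)])
    0 (Nat.zero_le _)
  rw [show (((s.toList.length + 1 : Nat) : Int) - 1) = ((s.toList.length : Int)) from by
      push_cast; ring] at h
  rw [show ((0 : Nat) : Int) = (0 : Int) from rfl] at h
  rw [h, show (0 : Int) = ((0 : Nat) : Int) from rfl,
      pvCell_natCast s.toList p.toList 0 0 (Nat.zero_le _) (Nat.zero_le _)]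
  simp

-- ===== B-side lemmas: correctness of the NFA simulation =====

-- matching against the token list (suffix recursion, mirrors pvMrec over units)
def pvMatchTok : List Char → List (Char × Bool) → Bool
  | s, [] => s.isEmpty
  | s, (c, true) :: ts =>
    pvMatchTok s ts ||
      (match s with
       | [] => false
       | x :: s' => (c == x || c == '.') && pvMatchTok s' ((c, true) :: ts))
  | s, (c, false) :: ts =>
    match s with
    | [] => false
    | x :: s' => (c == x || c == '.') && pvMatchTok s' ts
termination_by s ts => s.length + ts.length
decreasing_by all_goals first
  | (simp; omega)
  | simp

-- pvEval ts act v = "some active state j can match the remaining string v"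
def pvEval : List (Char × Bool) → List Bool → List Char → Bool
  | [], act, v => act.headD false && pvMatchTok v []
  | tk :: ts, act, v => (act.headD false && pvMatchTok v (tk :: ts)) || pvEval ts act.tail v

-- the active set is closed under the epsilon edge (starred state j active → j+1 active)
def pvClosedB : List (Char × Bool) → List Bool → Bool
  | [], _ => true
  | (_, st) :: ts, act =>
    (!(st && act.headD false) || act.tail.headD false) && pvClosedB ts act.tail

theorem pvMatchTok_nil_tok (s : List Char) : pvMatchTok s [] = s.isEmpty := by
  rw [pvMatchTok.eq_def]

theorem pvMatchTok_star (s : List Char) (c : Char) (ts : List (Char × Bool)) :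
    pvMatchTok s ((c, true) :: ts) =
      (pvMatchTok s ts ||
        (match s with
         | [] => false
         | x :: s' => (c == x || c == '.') && pvMatchTok s' ((c, true) :: ts))) := by
  rw [pvMatchTok.eq_def]

theorem pvMatchTok_plain (s : List Char) (c : Char) (ts : List (Char × Bool)) :
    pvMatchTok s ((c, false) :: ts) =
      (match s with
       | [] => false
       | x :: s' => (c == x || c == '.') && pvMatchTok s' ts) := by
  rw [pvMatchTok.eq_def]

-- bridge: token matching = pvMrec on the raw pattern
theorem tok_bridge : ∀ (q : List Char) (s : List Char),
    pvMatchTok s (pvTokens q) = pvMrec s q := by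
  intro q
  induction q using pvTokens.induct with
  | case1 =>
    intro s
    rw [pvTokens, pvMatchTok_nil_tok, pvMrec_nil]
  | case2 c rest hstar ih =>
    obtain ⟨t, rfl⟩ : ∃ t, rest = '*' :: t := by
      cases rest with
      | nil => simp at hstar
      | cons y t => simp at hstar; exact ⟨t, by rw [hstar]⟩
    rw [pvTokens, if_pos (show ('*' :: t).head? = some '*' from rfl)]
    rw [show List.tail ('*' :: t) = t from rfl] at ih ⊢
    intro s
    induction s with
    | nil =>
      rw [pvMatchTok_star, pvMrec_cons, if_pos hstar]
      simp [ih []]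
    | cons x s' ihs =>
      rw [pvMatchTok_star, pvMrec_cons, if_pos hstar]
      simp only [ih (x :: s'), ihs, List.tail_cons]
  | case3 c rest hstar ih =>
    rw [pvTokens, if_neg hstar]
    intro s
    cases s with
    | nil => rw [pvMatchTok_plain, pvMrec_cons, if_neg hstar]
    | cons x s' =>
      rw [pvMatchTok_plain, pvMrec_cons, if_neg hstar]
      simp only [ih s']

theorem closure_length : ∀ (ts : List (Char × Bool)) (act : List Bool),
    act.length = ts.length + 1 → (pvClosure ts act).length = ts.length + 1 := by
  intro ts
  induction ts with
  | nil => intro act h; rw [pvClosure]; exact h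
  | cons tk ts ih =>
    intro act h
    obtain ⟨c, st⟩ := tk
    cases act with
    | nil => simp at h
    | cons a rest =>
      rw [pvClosure]
      simp only [List.length_cons]
      rw [ih _ (by cases rest with | nil => simp at h | cons b tl => simpa using h)]

theorem step_length (x : Char) : ∀ (ts : List (Char × Bool)) (inc : Bool) (act : List Bool),
    act.length = ts.length + 1 → (pvStep x ts inc act).length = ts.length + 1 := by
  intro ts
  induction ts with
  | nil => intro inc act _; rw [pvStep]; rfl
  | cons tk ts ih =>
    intro inc act h
    obtain ⟨c, st⟩ := tk
    cases act with
    | nil => simp at h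
    | cons a rest =>
      have hr : rest.length = ts.length + 1 := by simpa using h
      rw [pvStep]
      cases st <;> simp [ih _ rest hr]

theorem closure_head : ∀ (ts : List (Char × Bool)) (h : Bool) (tl : List Bool),
    (pvClosure ts (h :: tl)).headD false = h := by
  intro ts h tl
  cases ts with
  | nil => rw [pvClosure]; rfl
  | cons tk ts => obtain ⟨c, st⟩ := tk; rw [pvClosure]; rfl

-- pvEval is or-linear in the head bit of the active set
theorem eval_head_or (ts : List (Char × Bool)) (b1 b2 : Bool) (tl : List Bool) (v : List Char) :
    pvEval ts ((b1 || b2) :: tl) v =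
      ((b2 && pvMatchTok v ts) || pvEval ts (b1 :: tl) v) := by
  cases ts with
  | nil =>
    rw [pvEval, pvEval]
    cases b1 <;> cases b2 <;> simp [pvMatchTok_nil_tok]
  | cons tk ts' =>
    rw [pvEval, pvEval]
    simp only [List.headD_cons, List.tail_cons]
    cases b1 <;> cases b2 <;> simp


theorem eval_head_le : ∀ (ts : List (Char × Bool)) (h : Bool) (tl : List Bool) (v : List Char),
    ((h && pvMatchTok v ts) || pvEval ts (h :: tl) v) = pvEval ts (h :: tl) v := by
  intro ts h tl v
  cases ts with
  | nil =>
    rw [pvEval]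
    simp only [List.headD_cons]
    cases h <;> cases pvMatchTok v [] <;> simp
  | cons tk ts2 =>
    rw [pvEval]
    simp only [List.headD_cons, List.tail_cons]
    cases h <;> cases hm : pvMatchTok v (tk :: ts2) <;> simp

-- absorption: a starred unit may be skipped
theorem matchTok_skip_star (v : List Char) (c : Char) (ts : List (Char × Bool)) (b : Bool) :
    ((b && pvMatchTok v ((c, true) :: ts)) || (b && pvMatchTok v ts)) =
      (b && pvMatchTok v ((c, true) :: ts)) := by
  rw [pvMatchTok_star]
  cases b <;> cases hm : pvMatchTok v ts <;> simp

theorem closure_eval : ∀ (ts : List (Char × Bool)) (act : List Bool) (v : List Char),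
    act.length = ts.length + 1 → pvEval ts (pvClosure ts act) v = pvEval ts act v := by
  intro ts
  induction ts with
  | nil => intro act v _; rw [pvClosure]
  | cons tk ts' ih =>
    intro act v h
    obtain ⟨c, st⟩ := tk
    cases act with
    | nil => simp at h
    | cons a rest =>
      cases rest with
      | nil => simp at h
      | cons b tl =>
        rw [pvClosure]
        simp only [List.headD_cons, List.tail_cons]
        rw [pvEval, pvEval]
        simp only [List.headD_cons, List.tail_cons]
        rw [ih _ v (by simpa using h)]
        rw [eval_head_or ts' b (st && a) tl v]
        cases st
        · simp
        · simp only [Bool.true_and]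
          rw [show ∀ (P Q R : Bool), ((P || (Q || R)) = ((P || Q) || R)) from by
            intro P Q R; cases P <;> cases Q <;> cases R <;> rfl]
          congr 1
          have := matchTok_skip_star v c ts' a
          rw [Bool.or_comm] at this ⊢
          exact this.symm ▸ rfl

theorem closure_closed : ∀ (ts : List (Char × Bool)) (act : List Bool),
    act.length = ts.length + 1 → pvClosedB ts (pvClosure ts act) = true := by
  intro ts
  induction ts with
  | nil => intro act _; rw [pvClosure, pvClosedB]
  | cons tk ts' ih =>
    intro act h
    obtain ⟨c, st⟩ := tk
    cases act with
    | nil => simp at h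
    | cons a rest =>
      cases rest with
      | nil => simp at h
      | cons b tl =>
        rw [pvClosure]
        simp only [List.headD_cons, List.tail_cons]
        rw [pvClosedB]
        simp only [List.headD_cons, List.tail_cons]
        rw [closure_head, ih _ (by simpa using h)]
        cases st <;> cases a <;> simp

theorem step_eval (x : Char) (v : List Char) :
    ∀ (ts : List (Char × Bool)) (act : List Bool) (inc : Bool),
    act.length = ts.length + 1 → pvClosedB ts act = true →
    pvEval ts (pvStep x ts inc act) v =
      ((inc && pvMatchTok v ts) || pvEval ts act (x :: v)) := by
  intro ts
  induction ts with
  | nil =>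
    intro act inc h _
    rw [pvStep, pvEval, pvEval]
    cases act with
    | nil => simp at h
    | cons a rest =>
      simp only [List.headD_cons]
      rw [pvMatchTok_nil_tok, pvMatchTok_nil_tok]
      cases v <;> cases a <;> cases inc <;> simp
  | cons tk ts' ih =>
    intro act inc h hc
    obtain ⟨c, st⟩ := tk
    cases act with
    | nil => simp at h
    | cons a rest =>
      have hr : rest.length = ts'.length + 1 := by simpa using h
      rw [pvClosedB] at hc
      simp only [List.headD_cons, List.tail_cons, Bool.and_eq_true] at hc
      obtain ⟨hc1, hc2⟩ := hc
      simp only [pvStep]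
      cases st
      · -- plain unit
        rw [if_neg (by simp)]
        rw [pvEval, pvEval]
        simp only [List.headD_cons, List.tail_cons]
        rw [ih rest (a && (c == x || c == '.')) hr hc2]
        rw [pvMatchTok_plain (x :: v) c ts']
        simp only
        cases inc <;> cases a <;> cases hcm : (c == x || c == '.') <;> simp
      · -- starred unit
        rw [if_pos rfl]
        rw [pvEval, pvEval]
        simp only [List.headD_cons, List.tail_cons]
        rw [ih rest false hr hc2]
        simp only [Bool.false_and, Bool.false_or]
        rw [pvMatchTok_star (x :: v) c ts']
        -- use closedness: st ∧ a → rest.headD = true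
        cases rest with
        | nil => simp at hr
        | cons b tl =>
          simp only [List.headD_cons] at hc1 ⊢
          cases a
          · simp
          · simp only [Bool.and_true, Bool.true_and] at hc1 ⊢
            have hb : b = true := by cases b <;> simp_all
            subst hb
            have hE := eval_head_le ts' true tl (x :: v)
            simp only [Bool.true_and] at hE
            cases inc <;> cases hcm : (c == x || c == '.') <;>
              cases hm1 : pvMatchTok (x :: v) ts' <;>
              cases hm2 : pvMatchTok v ((c, true) :: ts') <;>
              simp_all

theorem last_eval : ∀ (ts : List (Char × Bool)) (act : List Bool),
    act.length = ts.length + 1 → pvClosedB ts act = true →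
    act.getD ts.length false = pvEval ts act [] := by
  intro ts
  induction ts with
  | nil =>
    intro act h _
    cases act with
    | nil => simp at h
    | cons a rest =>
      rw [pvEval]
      simp [pvMatchTok_nil_tok]
  | cons tk ts' ih =>
    intro act h hc
    obtain ⟨c, st⟩ := tk
    cases act with
    | nil => simp at h
    | cons a rest =>
      have hr : rest.length = ts'.length + 1 := by simpa using h
      rw [pvClosedB] at hc
      simp only [List.headD_cons, List.tail_cons, Bool.and_eq_true] at hc
      obtain ⟨hc1, hc2⟩ := hc
      rw [pvEval]
      simp only [List.headD_cons, List.tail_cons, List.length_cons, List.getD_cons_succ]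
      rw [ih rest hr hc2]
      -- show the head disjunct is absorbed by the tail evaluation
      cases st
      · rw [pvMatchTok_plain]
        simp
      · rw [pvMatchTok_star]
        cases a
        · simp
        · simp only [Bool.true_and, Bool.and_true] at hc1 ⊢
          have hb : rest.headD false = true := by cases hrh : rest.headD false <;> simp_all
          cases rest with
          | nil => simp at hr
          | cons b tl =>
            simp only [List.headD_cons] at hb
            subst hb
            have hE := eval_head_le ts' true tl []
            simp only [Bool.true_and] at hE
            cases hm : pvMatchTok [] ts' <;> simp_all

theorem eval_nil_act : ∀ (ts : List (Char × Bool)) (v : List Char), pvEval ts [] v = false := by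
  intro ts
  induction ts with
  | nil => intro v; rw [pvEval]; simp
  | cons tk ts' ih => intro v; rw [pvEval]; simp [ih v]

theorem eval_replicate_false : ∀ (ts : List (Char × Bool)) (k : Nat) (v : List Char),
    pvEval ts (List.replicate k false) v = false := by
  intro ts
  induction ts with
  | nil =>
    intro k v
    rw [pvEval]
    cases k <;> simp [List.replicate_succ]
  | cons tk ts' ih =>
    intro k v
    rw [pvEval]
    cases k with
    | zero => simp [eval_nil_act]
    | succ k' => simp [List.replicate_succ, ih k' v]

theorem eval_init (ts : List (Char × Bool)) (v : List Char) :
    pvEval ts (true :: List.replicate ts.length false) v = pvMatchTok v ts := by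
  cases ts with
  | nil => rw [pvEval]; simp
  | cons tk ts' =>
    rw [pvEval]
    simp only [List.headD_cons, List.tail_cons, Bool.true_and]
    rw [eval_replicate_false ts' _ v]
    simp

theorem run_eval (ts : List (Char × Bool)) :
    ∀ (v : List Char) (act : List Bool),
    act.length = ts.length + 1 → pvClosedB ts act = true →
    (v.foldl (fun act x => pvClosure ts (pvStep x ts false act)) act).getD ts.length false =
      pvEval ts act v := by
  intro v
  induction v with
  | nil => intro act h hc; rw [List.foldl_nil]; exact last_eval ts act h hc
  | cons x v' ih =>
    intro act h hc
    rw [List.foldl_cons]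
    have hs : (pvStep x ts false act).length = ts.length + 1 := step_length x ts false act h
    have hl : (pvClosure ts (pvStep x ts false act)).length = ts.length + 1 :=
      closure_length ts _ hs
    rw [ih _ hl (closure_closed ts _ hs)]
    rw [closure_eval ts _ v' hs]
    rw [step_eval x v' ts act false h hc]
    simp

theorem alt_eq_mrec (s p : String) : isMatch3_alt s p = pvMrec s.toList p.toList := by
  show (s.toList.foldl
      (fun act x => pvClosure (pvTokens p.toList) (pvStep x (pvTokens p.toList) false act))
      (pvClosure (pvTokens p.toList)
        (true :: List.replicate (pvTokens p.toList).length false))).getD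
      (pvTokens p.toList).length false = _
  have h0 : (true :: List.replicate (pvTokens p.toList).length false).length =
      (pvTokens p.toList).length + 1 := by simp
  rw [run_eval (pvTokens p.toList) s.toList _ (closure_length _ _ h0) (closure_closed _ _ h0)]
  rw [closure_eval _ _ _ h0, eval_init, tok_bridge]

-- ===== VERDICT (by name: the statement is the Claim_ definition above) =====
theorem isMatch3_spec : Claim_equal_isMatch3 := by
  intro s p _
  unfold Spec_isMatch3
  rw [a_eq_mrec, alt_eq_mrec]
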